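-- pv_equiv track=rewrite | github.com/dannywillowliu-uchi/autonomous-development | src/mission_control/round_controller.py | _curate_discoveries
-- ===== SOURCE A (Python) =====
-- def _curate_discoveries(discoveries: list[str], max_chars: int = 4000) -> list[str]:
-- 	"""Curate discoveries to fit within budget."""
-- 	if not discoveries:
-- 		return []
-- 	result: list[str] = []
-- 	total = 0
-- 	for d in discoveries:
-- 		if total + len(d) > max_chars:
-- 			break
-- 		result.append(d)
-- 		total += len(d)
-- 	return result
-- ===== SOURCE B (Python) =====
-- def _curate_discoveries(discoveries: list[str], max_chars: int = 4000) -> list[str]: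
-- 	"""Curate discoveries to fit within budget: prefix sums + binary search for the cutoff."""
-- 	cums = []
-- 	s = 0
-- 	for d in discoveries:
-- 		s += len(d)
-- 		cums.append(s)
-- 	lo, hi = 0, len(cums)
-- 	while lo < hi:
-- 		mid = (lo + hi) // 2
-- 		if cums[mid] <= max_chars:
-- 			lo = mid + 1
-- 		else:
-- 			hi = mid
-- 	return discoveries[:lo]
-- ===== Notes on version B (the rewrite author's own statement) =====
-- stated objective: alternative
-- what changed: Replaced the running-total loop with early break by a prefix-sum table plus a binary search for the cutoff index, returning discoveries[:idx].
import Mathlib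
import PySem

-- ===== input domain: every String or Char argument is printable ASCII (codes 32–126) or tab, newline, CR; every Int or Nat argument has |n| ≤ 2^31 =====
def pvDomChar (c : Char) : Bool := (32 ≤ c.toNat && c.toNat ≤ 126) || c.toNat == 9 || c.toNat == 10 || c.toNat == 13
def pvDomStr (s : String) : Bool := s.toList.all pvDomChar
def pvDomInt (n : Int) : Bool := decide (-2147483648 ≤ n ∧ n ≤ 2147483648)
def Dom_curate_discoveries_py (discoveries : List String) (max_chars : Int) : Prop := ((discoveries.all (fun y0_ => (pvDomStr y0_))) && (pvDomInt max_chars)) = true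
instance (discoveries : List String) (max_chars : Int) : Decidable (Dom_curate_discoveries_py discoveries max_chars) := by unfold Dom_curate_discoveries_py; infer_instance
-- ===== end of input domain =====

-- B replaces A's running-total loop with early break by a prefix-sum table plus a
-- binary search for the cutoff index (objective: alternative, same asymptotic cost).

-- ===== PORT A =====
-- the for-loop with break: result is accumulated front-to-back, total is the running sum
def curateGoA (max_chars : Int) : List String → Int → List String
  | [], _ => []
  | d :: rest, total =>
    if total + PySem.Str.len d > max_chars then []
    else d :: curateGoA max_chars rest (total + PySem.Str.len d)

def curate_discoveries_py (discoveries : List String) (max_chars : Int) : List String :=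
  if discoveries = [] then [] else curateGoA max_chars discoveries 0

-- ===== PORT B =====
-- the while lo < hi binary-search loop of Source B; cums[mid] is in range whenever the loop
-- reaches it (0 ≤ lo ≤ mid < hi ≤ len cums), so getD with default 0 is exact
def bsearchB (cums : List Int) (max_chars : Int) (lo hi : Nat) : Nat :=
  if _h : lo < hi then
    let mid := (lo + hi) / 2
    if cums.getD mid 0 ≤ max_chars then bsearchB cums max_chars (mid + 1) hi
    else bsearchB cums max_chars lo mid
  else lo
termination_by hi - lo
decreasing_by all_goals omega

def curate_discoveries_py_alt (discoveries : List String) (max_chars : Int) : List String :=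
  -- the cums-building loop: cums.append(s) with running s
  let cums := (discoveries.foldl
      (fun (p : List Int × Int) d =>
        let s := p.2 + PySem.Str.len d
        (p.1 ++ [s], s)) ([], 0)).1
  let lo := bsearchB cums max_chars 0 cums.length
  -- discoveries[:lo] with 0 ≤ lo : Python slice = take
  discoveries.take lo

-- ===== PRECONDITION & SPEC =====
def Spec_curate_discoveries_py (discoveries : List String) (max_chars : Int) (out : List String) : Prop := out = curate_discoveries_py_alt discoveries max_chars
instance (discoveries : List String) (max_chars : Int) (out : List String) : Decidable (Spec_curate_discoveries_py discoveries max_chars out) := by unfold Spec_curate_discoveries_py; infer_instance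

-- ===== CLAIM (what is proved, stated in full; the proofs are below) =====
def Claim_equal_curate_discoveries_py : Prop := ∀ (discoveries : List String) (max_chars : Int), Dom_curate_discoveries_py discoveries max_chars → Spec_curate_discoveries_py discoveries max_chars (curate_discoveries_py discoveries max_chars)

-- ===== LEMMAS AND PROOFS =====

-- how many elements A keeps
def cntA (max_chars : Int) : List String → Int → Nat
  | [], _ => 0
  | d :: rest, total =>
    if total + PySem.Str.len d > max_chars then 0
    else cntA max_chars rest (total + PySem.Str.len d) + 1

-- the prefix sums of the lengths, offset by s (pure form of B's cums loop)
def psums : List String → Int → List Int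
  | [], _ => []
  | d :: rest, s => (s + PySem.Str.len d) :: psums rest (s + PySem.Str.len d)

theorem str_len_nonneg (s : String) : 0 ≤ PySem.Str.len s := by
  simp [PySem.Str.len_eq]

theorem goA_eq_take (max_chars : Int) (ds : List String) (total : Int) :
    curateGoA max_chars ds total = ds.take (cntA max_chars ds total) := by
  induction ds generalizing total with
  | nil => simp [curateGoA, cntA]
  | cons d rest ih =>
    simp only [curateGoA, cntA]
    split_ifs with h
    · simp
    · simp [ih]

theorem psums_length (ds : List String) (s : Int) : (psums ds s).length = ds.length := by
  induction ds generalizing s with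
  | nil => simp [psums]
  | cons d rest ih => simp [psums, ih]

theorem foldl_cums (ds : List String) (acc : List Int) (s : Int) :
    (ds.foldl (fun (p : List Int × Int) d =>
        let t := p.2 + PySem.Str.len d
        (p.1 ++ [t], t)) (acc, s)).1 = acc ++ psums ds s := by
  induction ds generalizing acc s with
  | nil => simp [psums]
  | cons d rest ih =>
    simp only [List.foldl]
    rw [ih]
    simp [psums]

theorem le_psums (ds : List String) (s : Int) : ∀ x ∈ psums ds s, s ≤ x := by
  induction ds generalizing s with
  | nil => simp [psums]
  | cons d rest ih =>
    intro x hx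
    have hl := str_len_nonneg d
    simp only [psums, List.mem_cons] at hx
    rcases hx with rfl | hx
    · omega
    · have := ih (s + PySem.Str.len d) x hx; omega

theorem psums_pairwise (ds : List String) (s : Int) :
    List.Pairwise (· ≤ ·) (psums ds s) := by
  induction ds generalizing s with
  | nil => simp [psums]
  | cons d rest ih =>
    simp only [psums, List.pairwise_cons]
    refine ⟨fun x hx => ?_, ih _⟩
    exact le_psums rest (s + PySem.Str.len d) x hx

theorem psums_mono (ds : List String) (s : Int) (i j : Nat) (hij : i ≤ j)
    (hj : j < (psums ds s).length) :
    (psums ds s).getD i 0 ≤ (psums ds s).getD j 0 := by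
  rcases Nat.eq_or_lt_of_le hij with rfl | hlt
  · exact le_refl _
  · have hp := (List.pairwise_iff_getElem).1 (psums_pairwise ds s) i j (by omega) hj hlt
    rw [List.getD_eq_getElem _ _ (by omega), List.getD_eq_getElem _ _ hj]
    exact hp

-- cntA is a "cut point" of the prefix sums: everything before it fits, the next one does not
theorem cntA_le (max_chars : Int) (ds : List String) (s : Int) :
    cntA max_chars ds s ≤ ds.length := by
  induction ds generalizing s with
  | nil => simp [cntA]
  | cons d rest ih =>
    simp only [cntA, List.length_cons]
    split_ifs
    · omega
    · have := ih (s + PySem.Str.len d); omega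

theorem cntA_before (max_chars : Int) (ds : List String) (s : Int) :
    ∀ i, i < cntA max_chars ds s → (psums ds s).getD i 0 ≤ max_chars := by
  induction ds generalizing s with
  | nil => simp [cntA]
  | cons d rest ih =>
    intro i hi
    simp only [cntA] at hi
    split_ifs at hi with h
    · omega
    · cases i with
      | zero =>
        simp only [psums, List.getD_cons_zero]
        simp only [PySem.Str.len_eq] at h ⊢
        omega
      | succ j =>
        simp only [psums, List.getD_cons_succ]
        exact ih (s + PySem.Str.len d) j (by omega)

theorem cntA_at (max_chars : Int) (ds : List String) (s : Int) :
    cntA max_chars ds s < ds.length →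
    max_chars < (psums ds s).getD (cntA max_chars ds s) 0 := by
  induction ds generalizing s with
  | nil => simp [cntA]
  | cons d rest ih =>
    intro hlt
    simp only [cntA, List.length_cons] at hlt ⊢
    split_ifs at hlt ⊢ with h
    · simp only [psums, List.getD_cons_zero]
      simp only [PySem.Str.len_eq] at h ⊢
      omega
    · simp only [psums, List.getD_cons_succ]
      exact ih (s + PySem.Str.len d) (by omega)

-- a cut point of a list is unique
theorem cut_unique (l : List Int) (mx : Int) (k1 k2 : Nat)
    (h1a : ∀ i, i < k1 → l.getD i 0 ≤ mx) (h1b : k1 < l.length → mx < l.getD k1 0)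
    (h1c : k1 ≤ l.length)
    (h2a : ∀ i, i < k2 → l.getD i 0 ≤ mx) (h2b : k2 < l.length → mx < l.getD k2 0)
    (h2c : k2 ≤ l.length) : k1 = k2 := by
  rcases Nat.lt_trichotomy k1 k2 with h | h | h
  · have := h2a k1 h
    have := h1b (by omega)
    omega
  · exact h
  · have := h1a k2 h
    have := h2b (by omega)
    omega

-- binary-search correctness on a list with nondecreasing getD
theorem bsearchB_spec (cums : List Int) (mx : Int)
    (mono : ∀ i j, i ≤ j → j < cums.length → cums.getD i 0 ≤ cums.getD j 0)
    (lo hi : Nat) :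
    lo ≤ hi → hi ≤ cums.length →
    (∀ i, i < lo → cums.getD i 0 ≤ mx) →
    (∀ i, hi ≤ i → i < cums.length → mx < cums.getD i 0) →
    (∀ i, i < bsearchB cums mx lo hi → cums.getD i 0 ≤ mx) ∧
    (bsearchB cums mx lo hi < cums.length → mx < cums.getD (bsearchB cums mx lo hi) 0) ∧
    bsearchB cums mx lo hi ≤ cums.length := by
  fun_induction bsearchB cums mx lo hi with
  | case1 lo hi h mid hle ih =>
    intro hlh hhl hbelow habove
    refine ih (by omega) hhl (fun i hi2 => ?_) habove
    rcases Nat.lt_or_ge i lo with h2 | h2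
    · exact hbelow i h2
    · calc cums.getD i 0 ≤ cums.getD mid 0 := mono i mid (by omega) (by omega)
        _ ≤ mx := hle
  | case2 lo hi h mid hgt ih =>
    intro hlh hhl hbelow habove
    refine ih (by omega) (by omega) hbelow (fun i hi2 hi3 => ?_)
    calc mx < cums.getD mid 0 := by omega
      _ ≤ cums.getD i 0 := mono mid i hi2 hi3
  | case3 lo hi h =>
    intro hlh hhl hbelow habove
    exact ⟨hbelow, fun hlt => habove lo (by omega) hlt, by omega⟩

-- ===== VERDICT (by name: the statement is the Claim_ definition above) =====
theorem curate_discoveries_py_spec : Claim_equal_curate_discoveries_py := by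
  intro ds mx _
  unfold Spec_curate_discoveries_py curate_discoveries_py curate_discoveries_py_alt
  have hcums : (ds.foldl (fun (p : List Int × Int) d =>
      let t := p.2 + PySem.Str.len d
      (p.1 ++ [t], t)) ([], 0)).1 = psums ds 0 := by
    simpa using foldl_cums ds [] 0
  simp only [hcums]
  have hlen := psums_length ds 0
  have hspec := bsearchB_spec (psums ds 0) mx
    (fun i j hij hj => psums_mono ds 0 i j hij hj)
    0 (psums ds 0).length (by omega) (le_refl _)
    (fun i hi => by omega) (fun i hi hi2 => by omega)
  set r := bsearchB (psums ds 0) mx 0 (psums ds 0).length with hr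
  have hkey : cntA mx ds 0 = r := by
    refine cut_unique (psums ds 0) mx _ _
      (cntA_before mx ds 0) (fun h => cntA_at mx ds 0 (by omega)) (by rw [hlen]; exact cntA_le mx ds 0)
      hspec.1 hspec.2.1 hspec.2.2
  split_ifs with h
  · subst h
    simp at hkey ⊢
  · rw [goA_eq_take, hkey]
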